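-- pv_equiv track=rewrite | github.com/argilla-io/argilla | src/rubrix/server/tasks/token_classification/metrics.py | build_tokens2chars_map
-- ===== SOURCE A (Python) =====
-- from collections import defaultdict
-- from typing import Any, ClassVar, Dict, Iterable, List, Optional, Set, Tuple
--
-- def build_tokens2chars_map(
--     chars2tokens: Dict[int, int]
-- ) -> Dict[int, Tuple[int, int]]:
--     tokens2chars_map = defaultdict(list)
--     for c, t in chars2tokens.items():
--         tokens2chars_map[t].append(c)
--
--     return {
--         token_idx: (min(chars), max(chars))
--         for token_idx, chars in tokens2chars_map.items()
--     }
-- ===== SOURCE B (Python) =====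
-- def build_tokens2chars_map(chars2tokens):
--     result = {}
--     for c, t in chars2tokens.items():
--         if t in result:
--             lo, hi = result[t]
--             result[t] = (min(lo, c), max(hi, c))
--         else:
--             result[t] = (c, c)
--     return result
-- ===== Notes on version B (the rewrite author's own statement) =====
-- stated objective: simpler
-- what changed: B maintains a running (min, max) per token in a single pass over the items, instead of first grouping all char indices into per-token lists and then reducing each list with min/max in a second comprehension pass.
import Mathlib
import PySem

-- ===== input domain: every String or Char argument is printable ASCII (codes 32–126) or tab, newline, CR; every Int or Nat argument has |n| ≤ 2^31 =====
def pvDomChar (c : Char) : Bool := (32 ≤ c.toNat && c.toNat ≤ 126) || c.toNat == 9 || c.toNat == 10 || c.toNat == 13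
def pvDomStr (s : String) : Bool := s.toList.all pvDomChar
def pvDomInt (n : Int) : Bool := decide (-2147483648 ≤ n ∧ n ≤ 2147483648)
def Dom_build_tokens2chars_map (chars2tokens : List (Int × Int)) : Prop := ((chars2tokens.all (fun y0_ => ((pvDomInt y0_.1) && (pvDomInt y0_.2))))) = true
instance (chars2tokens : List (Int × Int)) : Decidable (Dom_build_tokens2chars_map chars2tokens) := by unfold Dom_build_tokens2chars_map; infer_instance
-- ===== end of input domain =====

-- B replaces A's two passes (group char indices into per-token lists, then reduce each list
-- with min/max) by a single pass keeping a running (min, max) per token; objective: simpler.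

-- ===== PORT A =====
-- for c, t in chars2tokens.items(): tokens2chars_map[t].append(c)   (defaultdict(list))
-- then {tok: (min(chars), max(chars)) ...}; every stored list is nonempty, so the
-- .getD 0 default of min?/max? (Python would raise on an empty list) is never used.
def build_tokens2chars_map (chars2tokens : List (Int × Int)) : List (Int × Int × Int) :=
  let tokens2chars_map : PySem.Dict Int (List Int) :=
    chars2tokens.foldl (fun d p => d.modify p.2 [] (fun l => l ++ [p.1])) PySem.Dict.empty
  tokens2chars_map.items.map (fun q =>
    (q.1, ((PySem.List.min? q.2 (fun x => x)).getD 0, (PySem.List.max? q.2 (fun x => x)).getD 0)))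

-- ===== PORT B =====
-- for c, t in chars2tokens.items(): if t in result: widen (min, max); else result[t] = (c, c)
def build_tokens2chars_map_alt (chars2tokens : List (Int × Int)) : List (Int × Int × Int) :=
  (chars2tokens.foldl
    (fun d p =>
      match d.get? p.2 with
      | some q => d.insert p.2 (min q.1 p.1, max q.2 p.1)
      | none => d.insert p.2 (p.1, p.1))
    (PySem.Dict.empty : PySem.Dict Int (Int × Int))).items

-- ===== PRECONDITION & SPEC =====
-- Pre_ excludes lists whose first components repeat: they do not represent a value of the
-- parameter's type Dict[int, int] (a Python dict has unique keys), so the ports' behaviour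
-- on them corresponds to no Python input.
def Pre_build_tokens2chars_map (chars2tokens : List (Int × Int)) : Prop :=
  (chars2tokens.map (·.1)).Nodup
instance (chars2tokens : List (Int × Int)) : Decidable (Pre_build_tokens2chars_map chars2tokens) := by
  unfold Pre_build_tokens2chars_map; infer_instance

def pvWitness_build_tokens2chars_map : (List (Int × Int)) := [(0, 1), (1, 1), (2, 2), (5, 1)]

def Spec_build_tokens2chars_map (chars2tokens : List (Int × Int)) (out : List (Int × Int × Int)) : Prop := out = build_tokens2chars_map_alt chars2tokens
instance (chars2tokens : List (Int × Int)) (out : List (Int × Int × Int)) : Decidable (Spec_build_tokens2chars_map chars2tokens out) := by unfold Spec_build_tokens2chars_map; infer_instance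

-- ===== CLAIM (what is proved, stated in full; the proofs are below) =====
def Claim_equal_build_tokens2chars_map : Prop := ∀ (chars2tokens : List (Int × Int)), Dom_build_tokens2chars_map chars2tokens → Pre_build_tokens2chars_map chars2tokens → Spec_build_tokens2chars_map chars2tokens (build_tokens2chars_map chars2tokens)

-- ===== LEMMAS AND PROOFS =====

-- A's grouping loop, characterised through getD: token t's list is the chars paired with t.
theorem pvA_getD (xs : List (Int × Int)) (d : PySem.Dict Int (List Int)) (t : Int) :
    (xs.foldl (fun d p => d.modify p.2 [] (fun l => l ++ [p.1])) d).getD t []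
      = d.getD t [] ++ (xs.filter (fun p => p.2 == t)).map (·.1) := by
  induction xs generalizing d with
  | nil => simp
  | cons p xs ih =>
    simp only [List.foldl_cons, ih, List.filter_cons]
    rw [PySem.Dict.getD_modify]
    by_cases h : p.2 = t
    · simp [h]
    · simp [h, Ne.symm h]

-- the single step of B, rewritten as one insert of a matched value (defeq in each branch)
theorem pvB_step_eq :
    (fun (d : PySem.Dict Int (Int × Int)) (p : Int × Int) =>
        match d.get? p.2 with
        | some q => d.insert p.2 (min q.1 p.1, max q.2 p.1)
        | none => d.insert p.2 (p.1, p.1))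
      = fun d p => d.insert p.2
          (match d.get? p.2 with
           | some q => (min q.1 p.1, max q.2 p.1)
           | none => (p.1, p.1)) := by
  funext d p
  cases d.get? p.2 <;> rfl

-- the per-char accumulator B applies to token t's option slot
def pvStep (o : Option (Int × Int)) (c : Int) : Option (Int × Int) :=
  some (match o with
        | some q => (min q.1 c, max q.2 c)
        | none => (c, c))

-- B's loop, characterised through get?: fold pvStep over the chars paired with t.
theorem pvB_get? (xs : List (Int × Int)) (d : PySem.Dict Int (Int × Int)) (t : Int) :
    (xs.foldl
      (fun d p =>
        match d.get? p.2 with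
        | some q => d.insert p.2 (min q.1 p.1, max q.2 p.1)
        | none => d.insert p.2 (p.1, p.1)) d).get? t
      = ((xs.filter (fun p => p.2 == t)).map (·.1)).foldl pvStep (d.get? t) := by
  induction xs generalizing d with
  | nil => simp
  | cons p xs ih =>
    rw [pvB_step_eq] at ih ⊢
    simp only [List.foldl_cons, ih, List.filter_cons]
    by_cases h : p.2 = t
    · simp [h, pvStep]
    · simp [h, Ne.symm h, PySem.Dict.get?_insert]

-- folding pvStep from a started slot is the running min / running max
theorem pvStep_foldl_some (l : List Int) (a b : Int) :
    l.foldl pvStep (some (a, b)) = some (l.foldl min a, l.foldl max b) := by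
  induction l generalizing a b with
  | nil => rfl
  | cons c l ih => simp [pvStep, ih]

theorem build_tokens2chars_map_eq (xs : List (Int × Int)) :
    build_tokens2chars_map xs = build_tokens2chars_map_alt xs := by
  unfold build_tokens2chars_map build_tokens2chars_map_alt
  dsimp only
  have hkA : (xs.foldl (fun d p => d.modify p.2 [] (fun l => l ++ [p.1]))
      (PySem.Dict.empty : PySem.Dict Int (List Int))).keys
      = PySem.Set.update PySem.Dict.empty.keys (xs.map (·.2)) :=
    PySem.Dict.keys_foldl_modify_key xs (·.2) [] _ _
  have hkB : (xs.foldl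
      (fun d p => d.insert p.2
          (match d.get? p.2 with
           | some q => (min q.1 p.1, max q.2 p.1)
           | none => (p.1, p.1)))
      (PySem.Dict.empty : PySem.Dict Int (Int × Int))).keys
      = PySem.Set.update PySem.Dict.empty.keys (xs.map (·.2)) :=
    PySem.Dict.keys_foldl_insert_key xs (·.2) _ _
  have hndA : (xs.foldl (fun d p => d.modify p.2 [] (fun l => l ++ [p.1]))
      (PySem.Dict.empty : PySem.Dict Int (List Int))).keys.Nodup :=
    PySem.Dict.nodup_keys_foldl_modify_key xs (·.2) [] _ _ (by simp)
  have hndB : (xs.foldl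
      (fun d p => d.insert p.2
          (match d.get? p.2 with
           | some q => (min q.1 p.1, max q.2 p.1)
           | none => (p.1, p.1)))
      (PySem.Dict.empty : PySem.Dict Int (Int × Int))).keys.Nodup :=
    PySem.Dict.nodup_keys_foldl_insert_key xs (·.2) _ _ (by simp)
  rw [pvB_step_eq]
  rw [PySem.Dict.items_eq_map_keys _ hndA [], PySem.Dict.items_eq_map_keys _ hndB (0, 0)]
  rw [List.map_map, hkA, hkB]
  apply List.map_congr_left
  intro t ht
  have htmem : t ∈ xs.map (·.2) := by
    rcases (PySem.Set.mem_update _ _ _).1 ht with h | h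
    · simp [PySem.Dict.keys_empty] at h
    · exact h
  -- the char list of token t is nonempty
  have hne : (xs.filter (fun p => p.2 == t)).map (·.1) ≠ [] := by
    rcases List.mem_map.1 htmem with ⟨p, hp, hpt⟩
    have : p ∈ xs.filter (fun p => p.2 == t) := List.mem_filter.2 ⟨hp, by simp [hpt]⟩
    intro h
    simp only [List.map_eq_nil_iff] at h
    rw [h] at this
    exact (List.not_mem_nil) this
  obtain ⟨c, cs, hl⟩ := List.exists_cons_of_ne_nil hne
  have hA : (xs.foldl (fun d p => d.modify p.2 [] (fun l => l ++ [p.1]))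
      (PySem.Dict.empty : PySem.Dict Int (List Int))).getD t [] = c :: cs := by
    rw [pvA_getD, ← hl]; simp
  have hB : (xs.foldl
      (fun d p => d.insert p.2
          (match d.get? p.2 with
           | some q => (min q.1 p.1, max q.2 p.1)
           | none => (p.1, p.1)))
      (PySem.Dict.empty : PySem.Dict Int (Int × Int))).getD t (0, 0)
      = (cs.foldl min c, cs.foldl max c) := by
    rw [PySem.Dict.getD_eq_get?_getD]
    rw [show (fun (d : PySem.Dict Int (Int × Int)) (p : Int × Int) => d.insert p.2
          (match d.get? p.2 with
           | some q => (min q.1 p.1, max q.2 p.1)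
           | none => (p.1, p.1))) = _ from (pvB_step_eq).symm]
    rw [pvB_get?, hl]
    simp only [List.foldl_cons]
    have : pvStep ((PySem.Dict.empty : PySem.Dict Int (Int × Int)).get? t) c = some (c, c) := by
      simp [pvStep, PySem.Dict.get?_empty]
    rw [this, pvStep_foldl_some]
    rfl
  simp only [Function.comp_apply]
  rw [hA, hB]
  simp [PySem.List.min?_id_cons, PySem.List.max?_id_cons]

-- ===== VERDICT (by name: the statement is the Claim_ definition above) =====
theorem build_tokens2chars_map_spec : Claim_equal_build_tokens2chars_map := by
  intro xs _ _
  unfold Spec_build_tokens2chars_map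
  exact build_tokens2chars_map_eq xs
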